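-- pv_equiv track=rewrite | github.com/RIKEN-RCCS/OpenFold-for-Fugaku | preproc_fugaku/scripts/precompute_alignments_fugaku.py | add_unique_suffix
-- ===== SOURCE A (Python) =====
-- def add_unique_suffix(input_chains):
--     """
--     Returns a list of chain names with additional suffix so that every name become unique.
--
--     Args:
--         input_chains:
--             A list of chain names
--     Returns:
--         A list of chain names
--     """
--
--     ret_chains = []
--     known_set = set()
--     input_set = set(input_chains)
--     for c in input_chains:
--        uc  = c
--        i = 0
--        while True:
--            if uc not in known_set and not (i > 0 and uc in input_set):
--                ret_chains.append(uc)
--                known_set.add(uc)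
--                break
--
--            else:
--                uc = f"{c}_{i}"
--                i += 1
--
--     return ret_chains
-- ===== SOURCE B (Python) =====
-- def add_unique_suffix(input_chains):
--     """
--     Returns a list of chain names with additional suffix so that every name become unique.
--
--     Args:
--         input_chains:
--             A list of chain names
--     Returns:
--         A list of chain names
--     """
--     input_set = set(input_chains)
--     known_set = set()
--     next_i = {}
--     ret_chains = []
--     for c in input_chains:
--         if c not in known_set:
--             ret_chains.append(c)
--             known_set.add(c)
--         else:
--             i = next_i.get(c, 0)
--             uc = f"{c}_{i}"
--             while uc in known_set or uc in input_set:
--                 i += 1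
--                 uc = f"{c}_{i}"
--             ret_chains.append(uc)
--             known_set.add(uc)
--             next_i[c] = i + 1
--     return ret_chains
-- ===== Notes on version B (the rewrite author's own statement) =====
-- stated objective: faster
-- what changed: Instead of restarting the suffix search at i=0 and rescanning all previously rejected candidates for every repeated name, B keeps a per-base-name counter of the next suffix index to try and resumes from it (rejections are permanent since the blocking sets only grow), making the total work linear in the output size.
import Mathlib
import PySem

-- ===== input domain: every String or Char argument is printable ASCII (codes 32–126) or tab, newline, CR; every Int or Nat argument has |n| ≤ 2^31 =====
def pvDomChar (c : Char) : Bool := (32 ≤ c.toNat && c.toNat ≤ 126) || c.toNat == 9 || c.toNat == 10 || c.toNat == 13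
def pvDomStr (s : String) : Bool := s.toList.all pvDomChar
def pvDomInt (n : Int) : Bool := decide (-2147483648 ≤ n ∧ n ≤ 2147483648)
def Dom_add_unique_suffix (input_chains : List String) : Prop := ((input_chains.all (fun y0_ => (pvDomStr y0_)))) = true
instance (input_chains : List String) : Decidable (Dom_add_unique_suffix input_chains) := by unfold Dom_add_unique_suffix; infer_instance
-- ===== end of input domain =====

-- B replaces A's restart-from-0 suffix rescan by a per-base-name counter that resumes the
-- search where it last stopped (objective: faster; a timing run measures the speed-up).

-- ===== PORT A =====
-- A's inner 'while True' loop; the fuel argument only makes the recursion structural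
-- (with the fuel the port passes it is never exhausted — proved below).
def addA_find (input_set known : PySem.Set String) (c uc : String) (i : Int) : Nat → String
  | 0 => uc
  | fuel + 1 =>
    if ¬ PySem.Set.contains known uc = true ∧ ¬ (0 < i ∧ PySem.Set.contains input_set uc = true) then uc
    else addA_find input_set known c (c ++ "_" ++ PySem.Int.toStr i) (i + 1) fuel

-- one iteration of A's 'for c in input_chains' loop (state: ret_chains, known_set)
def stepA (input_set : PySem.Set String) (fuel : Nat)
    (st : List String × PySem.Set String) (c : String) : List String × PySem.Set String :=
  let uc := addA_find input_set st.2 c c 0 fuel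
  (st.1 ++ [uc], PySem.Set.add st.2 uc)

def add_unique_suffix (input_chains : List String) : List String :=
  let input_set := PySem.Set.ofList input_chains
  (input_chains.foldl (stepA input_set (2 * input_chains.length + 2)) ([], PySem.Set.empty)).1

-- ===== PORT B =====
-- B's 'while uc in known_set or uc in input_set' loop; returns (final i, uc); same fuel remark as for A.
def addB_find (input_set known : PySem.Set String) (c : String) (i : Int) : Nat → Int × String
  | 0 => (i, c ++ "_" ++ PySem.Int.toStr i)
  | fuel + 1 =>
    let uc := c ++ "_" ++ PySem.Int.toStr i
    if PySem.Set.contains known uc = true ∨ PySem.Set.contains input_set uc = true then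
      addB_find input_set known c (i + 1) fuel
    else (i, uc)

-- one iteration of B's loop (state: ret_chains, known_set, next_i)
def stepB (input_set : PySem.Set String) (fuel : Nat)
    (st : List String × PySem.Set String × PySem.Dict String Int) (c : String) :
    List String × PySem.Set String × PySem.Dict String Int :=
  if ¬ PySem.Set.contains st.2.1 c = true then (st.1 ++ [c], PySem.Set.add st.2.1 c, st.2.2)
  else
    let r := addB_find input_set st.2.1 c (PySem.Dict.getD st.2.2 c 0) fuel
    (st.1 ++ [r.2], PySem.Set.add st.2.1 r.2, PySem.Dict.insert st.2.2 c (r.1 + 1))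

def add_unique_suffix_alt (input_chains : List String) : List String :=
  let input_set := PySem.Set.ofList input_chains
  (input_chains.foldl (stepB input_set (2 * input_chains.length + 2))
    ([], PySem.Set.empty, PySem.Dict.empty)).1

-- ===== PRECONDITION & SPEC =====
def Spec_add_unique_suffix (input_chains : List String) (out : List String) : Prop := out = add_unique_suffix_alt input_chains
instance (input_chains : List String) (out : List String) : Decidable (Spec_add_unique_suffix input_chains out) := by unfold Spec_add_unique_suffix; infer_instance

-- ===== CLAIM (what is proved, stated in full; the proofs are below) =====
def Claim_equal_add_unique_suffix : Prop := ∀ (input_chains : List String), Dom_add_unique_suffix input_chains → Spec_add_unique_suffix input_chains (add_unique_suffix input_chains)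

-- ===== LEMMAS AND PROOFS =====

-- the candidate name f"{c}_{k}"
def cand (c : String) (k : Nat) : String := c ++ "_" ++ PySem.Int.toStr (k : Nat)

-- decoding a decimal digit string back to the Nat it prints (injectivity of Nat.toDigits)
def pvStep (a : Nat) (ch : Char) : Nat := a * 10 + (ch.toNat - 48)

def pvPush (n a : Nat) : Nat :=
  if n < 10 then a * 10 + n else pvPush (n / 10) a * 10 + n % 10
decreasing_by exact Nat.div_lt_self (by omega) (by omega)

lemma pvPush_zero (n : Nat) : pvPush n 0 = n := by
  induction n using Nat.strong_induction_on with
  | _ n ih =>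
    rw [pvPush]
    by_cases h : n < 10
    · simp [h]
    · have := ih (n / 10) (Nat.div_lt_self (by omega) (by omega))
      simp [h, this]; omega

lemma pvPush_ge (n a : Nat) (h : ¬ n < 10) :
    pvPush n a = pvPush (n / 10) a * 10 + n % 10 := by
  rw [pvPush, if_neg h]

lemma pvStep_digitChar (a m : Nat) (hm : m < 10) :
    pvStep a (Nat.digitChar m) = a * 10 + m := by
  interval_cases m <;> rfl

lemma toDigitsCore_foldl : ∀ (f n : Nat) (l : List Char) (a : Nat), n < f →
    (Nat.toDigitsCore 10 f n l).foldl pvStep a = l.foldl pvStep (pvPush n a) := by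
  intro f
  induction f with
  | zero => intro n l a h; omega
  | succ f ih =>
    intro n l a h
    simp only [Nat.toDigitsCore]
    by_cases h10 : n / 10 = 0
    · have hn : n < 10 := by omega
      rw [if_pos h10, List.foldl_cons, pvStep_digitChar a (n % 10) (by omega), pvPush,
        if_pos hn, Nat.mod_eq_of_lt hn]
    · rw [if_neg h10, ih (n / 10) _ a (by omega), List.foldl_cons,
        pvStep_digitChar _ (n % 10) (by omega), pvPush_ge n a (by omega)]

lemma toDigits_inj (k1 k2 : Nat) (h : Nat.toDigits 10 k1 = Nat.toDigits 10 k2) : k1 = k2 := by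
  have h1 := toDigitsCore_foldl (k1 + 1) k1 [] 0 (by omega)
  have h2 := toDigitsCore_foldl (k2 + 1) k2 [] 0 (by omega)
  rw [Nat.toDigits, Nat.toDigits] at h
  rw [h, h2] at h1
  simp only [List.foldl_nil, pvPush_zero] at h1
  exact h1.symm

lemma toStr_natCast_inj (k1 k2 : Nat) (h : PySem.Int.toStr (k1 : Nat) = PySem.Int.toStr (k2 : Nat)) :
    k1 = k2 := by
  have h' : PySem.Int.toChars (k1 : Nat) = PySem.Int.toChars (k2 : Nat) := by
    have := congrArg String.toList h
    simpa [PySem.Int.toList_toStr] using this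
  simp only [PySem.Int.toChars] at h'
  rw [if_neg (by omega), if_neg (by omega)] at h'
  simp only [Int.toNat_natCast] at h'
  exact toDigits_inj _ _ h'

lemma cand_inj (c : String) (k1 k2 : Nat) (h : cand c k1 = cand c k2) : k1 = k2 := by
  unfold cand at h
  have h1 : "_" ++ PySem.Int.toStr (k1 : Nat) = "_" ++ PySem.Int.toStr (k2 : Nat) := by
    exact (String.append_right_inj c).mp
      (by rw [String.append_assoc, String.append_assoc] at h; exact h)
  exact toStr_natCast_inj _ _ ((String.append_right_inj "_").mp h1)

-- a candidate index is 'free' when neither known_set nor input_set contains its name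
def pvFree (inp known : List String) (c : String) (k : Nat) : Prop :=
  ¬ (cand c k ∈ known ∨ cand c k ∈ inp)

lemma exists_free (inp known : List String) (c : String) :
    ∃ k, k ≤ known.length + inp.length ∧ pvFree inp known c k := by
  by_contra hcon
  push_neg at hcon
  set N := known.length + inp.length with hN
  have hall : ∀ j : Fin (N + 1), cand c j ∈ (known ++ inp).toFinset := by
    intro j
    have := hcon j (by omega)
    unfold pvFree at this
    push_neg at this
    rcases not_not.mp (by simpa [pvFree] using hcon j (by omega) : ¬ pvFree inp known c j) with h | h <;>
      simp [List.mem_toFinset, h]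
  have hinj : Function.Injective (fun j : Fin (N + 1) => cand c j) := by
    intro a b hab
    exact Fin.ext (cand_inj c a b hab)
  have hcard := Finset.card_le_card_of_injOn (s := (Finset.univ : Finset (Fin (N + 1))))
    (t := (known ++ inp).toFinset) (fun j : Fin (N + 1) => cand c j)
    (fun j _ => hall j) (Function.Injective.injOn hinj)
  simp only [Finset.card_univ, Fintype.card_fin] at hcard
  have hlen : (known ++ inp).toFinset.card ≤ N := by
    calc (known ++ inp).toFinset.card ≤ (known ++ inp).length := List.toFinset_card_le _
    _ = N := by simp [hN]
  omega

-- characterisation of A's inner loop once it is in the suffixed phase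
lemma addA_find_suffix (inp known : PySem.Set String) (c : String) (L : Nat)
    (hL : pvFree inp known c L) :
    ∀ (fuel j : Nat), j ≤ L → L - j < fuel →
      (∀ k, j ≤ k → k < L → ¬ pvFree inp known c k) →
      addA_find inp known c (cand c j) ((j : Nat) + 1) fuel = cand c L := by
  intro fuel
  induction fuel with
  | zero => intro j _ h _; omega
  | succ fuel ih =>
    intro j hjL hfuel hblk
    rw [addA_find]
    by_cases hj : j = L
    · subst hj
      rw [if_pos]
      constructor
      · simp only [Bool.not_eq_true, PySem.Set.contains_eq_listContains, ← Bool.not_eq_true,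
          ne_eq, List.contains_eq_mem, decide_eq_true_eq] at *
        intro hmem
        exact hL (Or.inl (by simpa using hmem))
      · rintro ⟨-, hmem⟩
        rw [PySem.Set.contains_iff] at hmem
        exact hL (Or.inr hmem)
    · have hjlt : j < L := by omega
      rw [if_neg]
      · have hcast : c ++ "_" ++ PySem.Int.toStr ((j : Int) + 1) = cand c (j + 1) := by
          unfold cand; norm_num
        have hcast2 : ((j : Int) + 1) + 1 = ((j + 1 : Nat) : Int) + 1 := by push_cast; ring
        rw [hcast, hcast2]
        exact ih (j + 1) (by omega) (by omega) (fun k hk1 hk2 => hblk k (by omega) hk2)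
      · have hb := hblk j (le_refl j) hjlt
        unfold pvFree at hb
        rw [not_not] at hb
        rcases hb with h | h
        · rintro ⟨hc, -⟩
          exact hc (by rw [PySem.Set.contains_iff]; exact h)
        · rintro ⟨-, hc⟩
          exact hc ⟨by positivity, by rw [PySem.Set.contains_iff]; exact h⟩

-- characterisation of A's inner loop from the top
lemma addA_find_top (inp known : PySem.Set String) (c : String) (L : Nat)
    (hL : pvFree inp known c L) (hmin : ∀ k, k < L → ¬ pvFree inp known c k)
    (fuel : Nat) (hfuel : L + 1 < fuel) :
    addA_find inp known c c 0 fuel = if c ∈ known then cand c L else c := by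
  obtain ⟨fuel, rfl⟩ : ∃ f, fuel = f + 1 := ⟨fuel - 1, by omega⟩
  rw [addA_find]
  by_cases hc : c ∈ known
  · rw [if_neg, if_pos hc]
    · have h0 : c ++ "_" ++ PySem.Int.toStr (0 : Int) = cand c 0 := by unfold cand; norm_num
      rw [h0, (by norm_num : (0 : Int) + 1 = ((0 : Nat) : Int) + 1)]
      exact addA_find_suffix inp known c L hL fuel 0 (by omega) (by omega)
        (fun k _ hk => hmin k hk)
    · rintro ⟨hcc, -⟩
      exact hcc (by rw [PySem.Set.contains_iff]; exact hc)
  · rw [if_pos, if_neg hc]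
    exact ⟨by simp [PySem.Set.contains_iff, hc], by rintro ⟨h, -⟩; omega⟩

-- characterisation of B's inner loop
lemma addB_find_eq (inp known : PySem.Set String) (c : String) (L : Nat)
    (hL : pvFree inp known c L) :
    ∀ (fuel j : Nat), j ≤ L → L - j < fuel →
      (∀ k, j ≤ k → k < L → ¬ pvFree inp known c k) →
      addB_find inp known c (j : Nat) fuel = ((L : Int), cand c L) := by
  intro fuel
  induction fuel with
  | zero => intro j _ h _; omega
  | succ fuel ih =>
    intro j hjL hfuel hblk
    rw [addB_find]
    by_cases hj : j = L
    · subst hj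
      unfold pvFree at hL
      push_neg at hL
      rw [if_neg]
      · simp [cand]
      · simp only [PySem.Set.contains_iff, not_or]
        exact ⟨hL.1, hL.2⟩
    · have hjlt : j < L := by omega
      rw [if_pos]
      · rw [(by push_cast; ring : (j : Int) + 1 = ((j + 1 : Nat) : Int))]
        exact ih (j + 1) (by omega) (by omega) (fun k hk1 hk2 => hblk k (by omega) hk2)
      · have hb := hblk j (le_refl j) hjlt
        unfold pvFree at hb
        rw [not_not] at hb
        rcases hb with h | h
        · exact Or.inl (by rw [PySem.Set.contains_iff]; exact h)
        · exact Or.inr (by rw [PySem.Set.contains_iff]; exact h)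

-- the counter invariant: every recorded next-index only skips indices that are blocked
def pvInv (inp known : List String) (next : PySem.Dict String Int) : Prop :=
  ∀ c v, next.get? c = some v → 0 ≤ v ∧ ∀ k : Nat, (k : Int) < v → ¬ pvFree inp known c k

lemma pvFree_mono (inp known : List String) (c x : String) (k : Nat)
    (h : ¬ pvFree inp known c k) : ¬ pvFree inp (known ++ [x]) c k := by
  unfold pvFree at *
  rw [not_not] at *
  rcases h with h | h
  · exact Or.inl (List.mem_append_left _ h)
  · exact Or.inr h

lemma fold_eq (inp : PySem.Set String) (N : Nat) (hinp : inp.length ≤ N) :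
    ∀ (rest out : List String) (known : PySem.Set String) (next : PySem.Dict String Int),
      pvInv inp known next → known.length + rest.length ≤ N →
      (rest.foldl (stepA inp (2 * N + 2)) (out, known)).1 =
      (rest.foldl (stepB inp (2 * N + 2)) (out, known, next)).1 := by
  intro rest
  induction rest with
  | nil => intro out known next _ _; rfl
  | cons c rest ih =>
    intro out known next hInv hlen
    obtain ⟨L0, hL0le, hL0free⟩ := exists_free inp known c
    -- the least free index
    have hex : ∃ k, pvFree inp known c k := ⟨L0, hL0free⟩
    haveI : DecidablePred (pvFree inp known c) := fun k => by unfold pvFree; infer_instance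
    set L := Nat.find hex with hLdef
    have hLfree : pvFree inp known c L := Nat.find_spec hex
    have hLmin : ∀ k, k < L → ¬ pvFree inp known c k := fun k hk => Nat.find_min hex hk
    have hLle : L ≤ 2 * N := by
      have := Nat.find_min' hex hL0free
      omega
    simp only [List.foldl_cons]
    by_cases hc : c ∈ known
    · -- A rescans from 0, B resumes from its counter; both land on cand c L
      have hA : stepA inp (2 * N + 2) (out, known) c =
          (out ++ [cand c L], PySem.Set.add known (cand c L)) := by
        unfold stepA
        rw [addA_find_top inp known c L hLfree hLmin _ (by omega), if_pos hc]
      -- B's start index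
      have hstart : ∃ j : Nat, PySem.Dict.getD next c 0 = (j : Int) ∧ j ≤ L ∧
          ∀ k, k < j → ¬ pvFree inp known c k := by
        cases hget : next.get? c with
        | none =>
          exact ⟨0, by rw [PySem.Dict.getD_eq_get?_getD, hget]; rfl, by omega, by omega⟩
        | some v =>
          obtain ⟨hv0, hvblk⟩ := hInv c v hget
          refine ⟨v.toNat, by rw [PySem.Dict.getD_eq_get?_getD, hget]; simp [Int.toNat_of_nonneg hv0], ?_, ?_⟩
          · by_contra hcon
            exact (hvblk L (by omega)) hLfree
          · intro k hk
            exact hvblk k (by omega)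
      obtain ⟨j, hj, hjle, hjblk⟩ := hstart
      have hB : stepB inp (2 * N + 2) (out, known, next) c =
          (out ++ [cand c L], PySem.Set.add known (cand c L),
            PySem.Dict.insert next c ((L : Int) + 1)) := by
        unfold stepB
        rw [if_neg (by simp [PySem.Set.contains_iff, hc])]
        simp only [hj]
        rw [addB_find_eq inp known c L hLfree _ j hjle (by omega) (fun k _ hk2 => hLmin k hk2)]
      rw [hA, hB]
      have hknown : PySem.Set.add known (cand c L) = known ++ [cand c L] := by
        apply PySem.Set.add_of_not_mem
        intro hmem
        exact hLfree (Or.inl hmem)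
      rw [hknown]
      apply ih
      · -- invariant for the new state
        intro c' v' hget'
        rw [PySem.Dict.get?_insert] at hget'
        by_cases hcc : c' = c
        · rw [if_pos hcc] at hget'
          injection hget' with hv'
          subst hcc
          refine ⟨by omega, ?_⟩
          intro k hk
          have hkL : k ≤ L := by omega
          by_cases hkL' : k < L
          · exact pvFree_mono inp known c' _ k (hLmin k hkL')
          · have : k = L := by omega
            subst this
            unfold pvFree
            rw [not_not]
            exact Or.inl (List.mem_append_right _ (by simp))
        · rw [if_neg hcc] at hget'
          obtain ⟨hv0, hvblk⟩ := hInv c' v' hget'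
          exact ⟨hv0, fun k hk => pvFree_mono inp known c' _ k (hvblk k hk)⟩
      · simp only [List.length_append, List.length_cons, List.length_nil] at *
        omega
    · -- fresh name: both emit c itself
      have hA : stepA inp (2 * N + 2) (out, known) c = (out ++ [c], PySem.Set.add known c) := by
        unfold stepA
        rw [addA_find_top inp known c L hLfree hLmin _ (by omega), if_neg hc]
      have hB : stepB inp (2 * N + 2) (out, known, next) c =
          (out ++ [c], PySem.Set.add known c, next) := by
        unfold stepB
        rw [if_pos (by simp [PySem.Set.contains_iff, hc])]
      rw [hA, hB, PySem.Set.add_of_not_mem hc]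
      apply ih
      · intro c' v' hget'
        obtain ⟨hv0, hvblk⟩ := hInv c' v' hget'
        exact ⟨hv0, fun k hk => pvFree_mono inp known c' c k (hvblk k hk)⟩
      · simp only [List.length_append, List.length_cons, List.length_nil] at *
        omega

-- ===== VERDICT (by name: the statement is the Claim_ definition above) =====
theorem add_unique_suffix_spec : Claim_equal_add_unique_suffix := by
  intro input_chains _
  unfold Spec_add_unique_suffix add_unique_suffix add_unique_suffix_alt
  exact fold_eq (PySem.Set.ofList input_chains) input_chains.length
    (PySem.Set.length_ofList_le input_chains) input_chains [] [] PySem.Dict.empty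
    (by intro c v h; simp [PySem.Dict.get?_empty] at h) (by simp)
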